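-- pv_equiv track=rewrite | github.com/psj8532/problem_solving | Programmers/2018_BLIND_KAKAO/프렌즈4블록.py | solution
-- ===== SOURCE A (Python) =====
-- from _collections import deque
--
-- def solution(m, n, board):
--     answer = 0
--     matrix = [[0]*n for _ in range(m)]
--     for i in range(m):
--         for j in range(n):
--             matrix[i][j] = board[i][j]
--     flag = False
--     while 1:
--         flag = False
--         visited = [[0] * n for _ in range(m)]
--         for i in range(m-1):
--             for j in range(n-1):
--                 if matrix[i][j] and matrix[i][j] == matrix[i+1][j] and matrix[i][j] == matrix[i][j+1] and matrix[i][j] == matrix[i+1][j+1]: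
--                     visited[i][j] = visited[i+1][j] = visited[i][j+1] = visited[i+1][j+1] = 1
--                     flag = True
--         if not flag: break
--         #remove
--         for i in range(m):
--             for j in range(n):
--                 if visited[i][j]:
--                     matrix[i][j] = 0
--                     answer += 1
--         # pull
--         for j in range(n):
--             posi = deque()
--             for i in range(m-1,-1,-1):
--                 if not matrix[i][j]:
--                     posi.append((i,j))
--                 elif posi and matrix[i][j]:
--                     r,c = posi.popleft()
--                     matrix[r][c] = matrix[i][j]
--                     matrix[i][j] = 0
--                     posi.append((i,j))
--
--     return answer
-- ===== SOURCE B (Python) =====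
-- def solution(m, n, board):
--     # Same two-phase 2x2 detection; removal+gravity replaced by a per-column
--     # rebuild: surviving cells are collected top-to-bottom and bottom-anchored.
--     matrix = [[board[i][j] for j in range(n)] for i in range(m)]
--     answer = 0
--     while True:
--         visited = [[0] * n for _ in range(m)]
--         flag = False
--         for i in range(m - 1):
--             for j in range(n - 1):
--                 v = matrix[i][j]
--                 if v and v == matrix[i + 1][j] and v == matrix[i][j + 1] and v == matrix[i + 1][j + 1]:
--                     visited[i][j] = visited[i + 1][j] = visited[i][j + 1] = visited[i + 1][j + 1] = 1
--                     flag = True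
--         if not flag:
--             break
--         answer += sum(map(sum, visited))
--         for j in range(n):
--             survivors = [matrix[i][j] for i in range(m) if not visited[i][j] and matrix[i][j]]
--             column = [0] * (m - len(survivors)) + survivors
--             for i in range(m):
--                 matrix[i][j] = column[i]
--     return answer
-- ===== Notes on version B (the rewrite author's own statement) =====
-- stated objective: idiomatic
-- what changed: The separate remove pass plus A's deque-of-empty-slots gravity (one swap at a time per column) is replaced by a single per-column rebuild: collect the surviving (unmarked, non-empty) cells top-to-bottom and rewrite the column as a pad of zeros over them, counting removals as the sum of the visited grid; the 2x2 detection pass and the outer while loop are unchanged.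
import Mathlib
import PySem

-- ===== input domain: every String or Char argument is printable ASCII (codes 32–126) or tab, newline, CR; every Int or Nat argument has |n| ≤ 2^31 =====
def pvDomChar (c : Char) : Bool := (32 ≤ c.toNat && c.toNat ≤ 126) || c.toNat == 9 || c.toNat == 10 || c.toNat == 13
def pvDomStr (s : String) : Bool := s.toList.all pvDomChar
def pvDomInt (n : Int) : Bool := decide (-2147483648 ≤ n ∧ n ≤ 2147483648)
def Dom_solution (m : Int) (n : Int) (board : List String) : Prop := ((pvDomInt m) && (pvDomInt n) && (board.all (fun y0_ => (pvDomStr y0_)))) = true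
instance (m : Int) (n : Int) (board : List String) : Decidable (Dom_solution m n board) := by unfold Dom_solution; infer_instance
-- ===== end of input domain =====

-- B keeps A's detection pass but replaces A's separate remove pass + deque-based
-- gravity with one per-column rebuild (survivors bottom-anchored); return value only.

-- ===== PORT A =====
-- Shared board/grid helpers (the building of the matrix and the 2x2 detection pass
-- are textually identical in A and in B, so both ports use these helpers).
-- Cells are Option Char: `some c` is a block character, `none` is Python's falsy 0.
-- A first builds an all-zero matrix and then overwrites every entry with board[i][j];
-- the port builds those final entries directly (rows with j-range empty stay empty,
-- exactly as [0]*n is [] for n <= 0). Out-of-range getD defaults are never reached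
-- inside Pre_solution.
-- board[i][j] copied row by row; `none` is returned exactly where Python's
-- board[i] / board[i][j] raises IndexError (these inputs are outside Pre_solution,
-- and the early `none` also keeps the port quickly evaluable there).
def buildRowAux (s : List Char) : Nat → Nat → Option (List (Option Char))
  | 0, _ => some []
  | c+1, j =>
    match s[j]? with
    | none => none
    | some ch =>
      match buildRowAux s c (j+1) with
      | none => none
      | some r => some (some ch :: r)

def buildAux (n' : Nat) (board : List String) : Nat → Nat → Option (List (List (Option Char)))
  | 0, _ => some []
  | c+1, i =>
    match board[i]? with
    | none => none
    | some s =>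
      match buildRowAux s.toList n' 0 with
      | none => none
      | some r =>
        match buildAux n' board c (i+1) with
        | none => none
        | some rs => some (r :: rs)

def buildMat (m' n' : Nat) (board : List String) : Option (List (List (Option Char))) :=
  buildAux n' board m' 0

def getCell (mat : List (List (Option Char))) (i j : Nat) : Option Char :=
  (mat.getD i []).getD j none

def setVis (g : List (List Nat)) (i j : Nat) : List (List Nat) :=
  g.set i ((g.getD i []).set j 1)

-- visited = [[0]*n ...]; mark all four cells of every matching 2x2 square; flag
def markSquares (m' n' : Nat) (mat : List (List (Option Char))) : List (List Nat) × Bool :=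
  (List.range (m' - 1)).foldl (fun s i =>
      (List.range (n' - 1)).foldl (fun s j =>
          let c := getCell mat i j
          if c.isSome ∧ c = getCell mat (i+1) j ∧ c = getCell mat i (j+1) ∧ c = getCell mat (i+1) (j+1)
          then (setVis (setVis (setVis (setVis s.1 i j) (i+1) j) i (j+1)) (i+1) (j+1), true)
          else s) s)
    ((List.range m').map (fun _ => List.replicate n' 0), false)

def colOfC (mat : List (List (Option Char))) (j : Nat) : List (Option Char) :=
  mat.map (fun row => row.getD j none)

def colOfN (g : List (List Nat)) (j : Nat) : List Nat :=
  g.map (fun row => row.getD j 0)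

-- rebuild an m' x n' matrix from its list of columns
def assembleM (m' n' : Nat) (cols : List (List (Option Char))) : List (List (Option Char)) :=
  (List.range m').map (fun i => (List.range n').map (fun j => (cols.getD j []).getD i none))

-- A's remove pass on one row: zero out visited cells, count them
def removeRowA : List (Option Char) → List Nat → List (Option Char) × Int
  | [], _ => ([], 0)
  | c :: cs, [] => (c :: cs, 0)
  | c :: cs, v :: vs =>
    let r := removeRowA cs vs
    if v ≠ 0 then (none :: r.1, r.2 + 1) else (c :: r.1, r.2)

def removeA : List (List (Option Char)) → List (List Nat) → List (List (Option Char)) × Int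
  | [], _ => ([], 0)
  | r :: rs, [] => (r :: rs, 0)
  | r :: rs, v :: vs =>
    let p := removeRowA r v
    let q := removeA rs vs
    (p.1 :: q.1, p.2 + q.2)

-- A's deque gravity on one column, processed bottom-up (the column is reversed, so
-- index k corresponds to A's row i = m-1-k; the deque holds empty slot indices)
def pullStep (s : List (Option Char) × List Nat) (k : Nat) : List (Option Char) × List Nat :=
  match s.1.getD k none with
  | none => (s.1, s.2 ++ [k])
  | some v =>
    match s.2 with
    | [] => s
    | r :: q => ((s.1.set r (some v)).set k none, q ++ [k])

def pullCol (col : List (Option Char)) : List (Option Char) :=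
  ((List.range col.reverse.length).foldl pullStep (col.reverse, ([] : List Nat))).1.reverse

-- the while loop; each flagged iteration clears >= 4 cells, so m'*n'+1 rounds suffice
def loopA : Nat → Nat → Nat → Int → List (List (Option Char)) → Int
  | 0, _, _, ans, _ => ans
  | f+1, m', n', ans, mat =>
    let mv := markSquares m' n' mat
    if mv.2 = false then ans
    else
      let p := removeA mat mv.1
      loopA f m' n' (ans + p.2)
        (assembleM m' n' ((List.range n').map (fun j => pullCol (colOfC p.1 j))))

def solution (m : Int) (n : Int) (board : List String) : Int :=
  match buildMat m.toNat n.toNat board with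
  | none => 0   -- Python raises IndexError here; outside Pre_solution
  | some mat => loopA (m.toNat * n.toNat + 1) m.toNat n.toNat 0 mat

-- ===== PORT B =====
-- answer += sum(map(sum, visited))
def sumGrid (g : List (List Nat)) : Int := ((g.map (fun r => r.sum)).sum : Nat)

-- one-pass column rebuild: unremoved blocks, bottom-anchored under a pad of zeros
def compactCol (m' : Nat) (col : List (Option Char)) (vcol : List Nat) : List (Option Char) :=
  let survivors := (col.zip vcol).filterMap (fun p => if p.2 = 0 ∧ p.1.isSome then some p.1 else none)
  List.replicate (m' - survivors.length) none ++ survivors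

def loopB : Nat → Nat → Nat → Int → List (List (Option Char)) → Int
  | 0, _, _, ans, _ => ans
  | f+1, m', n', ans, mat =>
    let mv := markSquares m' n' mat
    if mv.2 = false then ans
    else
      loopB f m' n' (ans + sumGrid mv.1)
        (assembleM m' n' ((List.range n').map (fun j => compactCol m' (colOfC mat j) (colOfN mv.1 j))))

def solution_alt (m : Int) (n : Int) (board : List String) : Int :=
  match buildMat m.toNat n.toNat board with
  | none => 0   -- Python raises IndexError here; outside Pre_solution
  | some mat => loopB (m.toNat * n.toNat + 1) m.toNat n.toNat 0 mat

-- ===== PRECONDITION & SPEC =====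
-- Pre_ excludes exactly the inputs where Python A raises IndexError reading
-- board[i][j]: for positive m and n the board must have at least m rows and each of
-- the first m rows at least n characters.
def Pre_solution (m : Int) (n : Int) (board : List String) : Prop :=
  m ≤ 0 ∨ n ≤ 0 ∨ (m ≤ (board.length : Int) ∧ ∀ s ∈ board.take m.toNat, n ≤ (s.length : Int))
instance (m : Int) (n : Int) (board : List String) : Decidable (Pre_solution m n board) := by
  unfold Pre_solution; infer_instance

def pvWitness_solution : Int × Int × List String := (2, 2, ["ab", "ab"])

def Spec_solution (m : Int) (n : Int) (board : List String) (out : Int) : Prop := out = solution_alt m n board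
instance (m : Int) (n : Int) (board : List String) (out : Int) : Decidable (Spec_solution m n board out) := by unfold Spec_solution; infer_instance

-- ===== CLAIM (what is proved, stated in full; the proofs are below) =====
def Claim_equal_solution : Prop := ∀ (m : Int) (n : Int) (board : List String), Dom_solution m n board → Pre_solution m n board → Spec_solution m n board (solution m n board)

-- ===== LEMMAS AND PROOFS =====

-- well-formedness: an m' x n' character matrix
def WFc (m' n' : Nat) (mat : List (List (Option Char))) : Prop :=
  mat.length = m' ∧ ∀ r ∈ mat, r.length = n'

-- well-formedness of a visited grid: m' x n' with entries in {0,1}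
def WFv (m' n' : Nat) (g : List (List Nat)) : Prop :=
  g.length = m' ∧ ∀ r ∈ g, r.length = n' ∧ ∀ x ∈ r, x ≤ 1

theorem foldl_inv {α β : Type} (P : β → Prop) (f : β → α → β) (l : List α)
    (h : ∀ s a, a ∈ l → P s → P (f s a)) (s : β) (hs : P s) : P (l.foldl f s) := by
  induction l generalizing s with
  | nil => exact hs
  | cons x xs ih =>
    exact ih (fun s a ha hp => h s a (List.mem_cons_of_mem _ ha) hp) _
      (h s x (List.mem_cons_self) hs)

theorem setVis_wf {m' n' : Nat} {g : List (List Nat)} (i j : Nat)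
    (hg : WFv m' n' g) : WFv m' n' (setVis g i j) := by
  obtain ⟨hlen, hrows⟩ := hg
  refine ⟨by simpa [setVis] using hlen, ?_⟩
  intro r hr
  rcases List.mem_or_eq_of_mem_set hr with h | h
  · exact hrows r h
  · subst h
    by_cases hi : i < g.length
    · have hmem : g.getD i [] ∈ g := by
        rw [List.getD_eq_getElem g [] hi]; exact List.getElem_mem hi
      obtain ⟨hl, he⟩ := hrows _ hmem
      refine ⟨by simpa using hl, ?_⟩
      intro x hx
      rcases List.mem_or_eq_of_mem_set hx with h' | h'
      · exact he x h'
      · omega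
    · have hid : setVis g i j = g := by
        unfold setVis; exact List.set_eq_of_length_le (by omega)
      rw [hid] at hr
      exact hrows _ hr

theorem markSquares_wf (m' n' : Nat) (mat : List (List (Option Char))) :
    WFv m' n' (markSquares m' n' mat).1 := by
  unfold markSquares
  have main : ∀ s : List (List Nat) × Bool, WFv m' n' s.1 →
      WFv m' n' (((List.range (m' - 1)).foldl (fun s i =>
        (List.range (n' - 1)).foldl (fun s j =>
          let c := getCell mat i j
          if c.isSome ∧ c = getCell mat (i+1) j ∧ c = getCell mat i (j+1) ∧ c = getCell mat (i+1) (j+1)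
          then (setVis (setVis (setVis (setVis s.1 i j) (i+1) j) i (j+1)) (i+1) (j+1), true)
          else s) s) s)).1 := by
    intro s hs
    refine foldl_inv (fun s => WFv m' n' s.1) _ _ (fun s i _ hsi => ?_) s hs
    refine foldl_inv (fun s => WFv m' n' s.1) _ _ (fun s j _ hsj => ?_) s hsi
    dsimp only
    split
    · exact setVis_wf _ _ (setVis_wf _ _ (setVis_wf _ _ (setVis_wf _ _ hsj)))
    · exact hsj
  refine main _ ⟨by simp, ?_⟩
  intro r hr
  obtain ⟨i, -, hi⟩ := List.mem_map.mp hr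
  rw [← hi]
  refine ⟨by simp, ?_⟩
  intro x hx; rw [List.eq_of_mem_replicate hx]; omega

-- A's remove count on a row is the row sum of the 0/1 visited row
theorem removeRowA_count (row : List (Option Char)) (vrow : List Nat)
    (hlen : row.length = vrow.length) (h01 : ∀ x ∈ vrow, x ≤ 1) :
    (removeRowA row vrow).2 = (vrow.sum : Int) := by
  induction row generalizing vrow with
  | nil => cases vrow with
    | nil => simp [removeRowA]
    | cons v vs => simp at hlen
  | cons c cs ih =>
    cases vrow with
    | nil => simp at hlen
    | cons v vs =>
      have h1 : v ≤ 1 := h01 v (List.mem_cons_self)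
      have ih' := ih vs (by simpa using hlen) (fun x hx => h01 x (List.mem_cons_of_mem _ hx))
      by_cases hv : v = 0
      · simp [removeRowA, hv, ih']
      · have : v = 1 := by omega
        subst this
        simp [removeRowA, ih']
        ring

theorem removeA_count_aux {n' : Nat} : ∀ (mat : List (List (Option Char))) (vis : List (List Nat)),
    mat.length = vis.length → (∀ r ∈ mat, r.length = n') →
    (∀ v ∈ vis, v.length = n' ∧ ∀ x ∈ v, x ≤ 1) →
    (removeA mat vis).2 = sumGrid vis
  | [], [], _, _, _ => by simp [removeA, sumGrid]
  | [], v :: vs, h, _, _ => by simp at h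
  | r :: rs, [], h, _, _ => by simp at h
  | r :: rs, v :: vs, hlen, hm, hv => by
    have hr := hm r (List.mem_cons_self)
    have hv' := hv v (List.mem_cons_self)
    have h1 := removeRowA_count r v (by rw [hr, hv'.1]) hv'.2
    have ih := removeA_count_aux rs vs (by simpa using hlen)
      (fun x hx => hm x (List.mem_cons_of_mem _ hx)) (fun x hx => hv x (List.mem_cons_of_mem _ hx))
    simp only [removeA, h1, ih, sumGrid, List.map_cons, List.sum_cons]
    push_cast
    ring

theorem removeA_count (mat : List (List (Option Char))) (vis : List (List Nat))
    {m' n' : Nat} (hm : WFc m' n' mat) (hv : WFv m' n' vis) :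
    (removeA mat vis).2 = sumGrid vis :=
  removeA_count_aux mat vis (by rw [hm.1, hv.1]) hm.2 (fun v hvv => hv.2 v hvv)

-- characterisation of the remove pass as a pointwise zipWith (for equal shapes)
def remCell (c : Option Char) (v : Nat) : Option Char := if v ≠ 0 then none else c

theorem removeRowA_fst (row : List (Option Char)) (vrow : List Nat)
    (hlen : row.length = vrow.length) :
    (removeRowA row vrow).1 = List.zipWith remCell row vrow := by
  induction row generalizing vrow with
  | nil => cases vrow <;> simp_all [removeRowA]
  | cons c cs ih =>
    cases vrow with
    | nil => simp at hlen
    | cons v vs =>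
      by_cases hv : v = 0 <;>
        simp [removeRowA, remCell, hv, ih vs (by simpa using hlen)]

theorem removeA_fst_aux {n' : Nat} : ∀ (mat : List (List (Option Char))) (vis : List (List Nat)),
    mat.length = vis.length → (∀ r ∈ mat, r.length = n') → (∀ v ∈ vis, v.length = n') →
    (removeA mat vis).1 = List.zipWith (fun r v => List.zipWith remCell r v) mat vis
  | [], [], _, _, _ => by simp [removeA]
  | [], v :: vs, h, _, _ => by simp at h
  | r :: rs, [], h, _, _ => by simp at h
  | r :: rs, v :: vs, hlen, hm, hv => by
    have hr := hm r (List.mem_cons_self)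
    have hv' := hv v (List.mem_cons_self)
    simp [removeA, removeRowA_fst r v (by rw [hr, hv']),
      removeA_fst_aux rs vs (by simpa using hlen)
        (fun x hx => hm x (List.mem_cons_of_mem _ hx)) (fun x hx => hv x (List.mem_cons_of_mem _ hx))]

theorem removeA_fst (mat : List (List (Option Char))) (vis : List (List Nat))
    {m' n' : Nat} (hm : WFc m' n' mat) (hv : WFv m' n' vis) :
    (removeA mat vis).1 = List.zipWith (fun r v => List.zipWith remCell r v) mat vis :=
  removeA_fst_aux mat vis (by rw [hm.1, hv.1]) hm.2 (fun v hvv => (hv.2 v hvv).1)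

-- extracting column j commutes with the pointwise remove (for j < n', equal shapes)
theorem colOfC_zipWith_aux {n' : Nat} (j : Nat) (hj : j < n') :
    ∀ (mat : List (List (Option Char))) (vis : List (List Nat)),
    (∀ r ∈ mat, r.length = n') → (∀ v ∈ vis, v.length = n') →
    colOfC (List.zipWith (fun r v => List.zipWith remCell r v) mat vis) j =
      List.zipWith remCell (colOfC mat j) (colOfN vis j)
  | [], vis, _, _ => by cases vis <;> simp [colOfC, colOfN]
  | r :: rs, [], _, _ => by simp [colOfC, colOfN]
  | r :: rs, v :: vs, hm, hv => by
    have hr := hm r (List.mem_cons_self)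
    have hv' := hv v (List.mem_cons_self)
    have hjr : j < r.length := by omega
    have hjv : j < v.length := by omega
    have hcell : (List.zipWith remCell r v).getD j none = remCell (r.getD j none) (v.getD j 0) := by
      rw [List.getD_eq_getElem _ _ (by rw [List.length_zipWith]; omega),
        List.getD_eq_getElem _ _ hjr, List.getD_eq_getElem _ _ hjv, List.getElem_zipWith]
    have ih := colOfC_zipWith_aux j hj rs vs
      (fun x hx => hm x (List.mem_cons_of_mem _ hx)) (fun x hx => hv x (List.mem_cons_of_mem _ hx))
    simp only [List.zipWith_cons_cons, colOfC, colOfN, List.map_cons] at ih ⊢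
    rw [hcell, ih]

theorem colOfC_zipWith (mat : List (List (Option Char))) (vis : List (List Nat))
    {m' n' : Nat} (hm : WFc m' n' mat) (hv : WFv m' n' vis) (j : Nat) (hj : j < n') :
    colOfC (List.zipWith (fun r v => List.zipWith remCell r v) mat vis) j =
      List.zipWith remCell (colOfC mat j) (colOfN vis j) :=
  colOfC_zipWith_aux j hj mat vis hm.2 (fun v hvv => (hv.2 v hvv).1)

-- filtering the zeroed column = B's survivor comprehension
theorem filter_zipWith_eq_survivors (col : List (Option Char)) (vcol : List Nat) :
    (List.zipWith remCell col vcol).filter (fun c => c.isSome) =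
      (col.zip vcol).filterMap (fun p => if p.2 = 0 ∧ p.1.isSome then some p.1 else none) := by
  induction col generalizing vcol with
  | nil => cases vcol <;> simp
  | cons c cs ih =>
    cases vcol with
    | nil => simp
    | cons v vs =>
      by_cases hv : v = 0
      · cases c <;> simp [remCell, hv, ih vs]
      · simp [remCell, hv, ih vs]

-- ===== the deque-gravity invariant =====
-- moving a block onto the lowest empty slot and vacating its own slot
theorem arr_step (S D : List (Option Char)) (j : Nat) (hj : 1 ≤ j) (v : Char) :
    ((S ++ (List.replicate j (none : Option Char) ++ (some v :: D))).set S.length (some v)).set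
        (S.length + j) none =
      (S ++ [some v]) ++ (List.replicate j (none : Option Char) ++ D) := by
  obtain ⟨jp, rfl⟩ : ∃ jp, j = jp + 1 := ⟨j - 1, by omega⟩
  rw [List.replicate_succ]
  rw [List.set_append_right _ _ (le_refl _), Nat.sub_self, List.cons_append, List.set_cons_zero]
  rw [List.set_append_right _ _ (by omega)]
  have h1 : S.length + (jp + 1) - S.length = jp + 1 := by omega
  rw [h1, List.set_cons_succ]
  rw [List.set_append_right _ _ (by simp)]
  have h2 : jp - (List.replicate jp (none : Option Char)).length = 0 := by simp
  rw [h2, List.set_cons_zero]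
  have h3 : List.replicate jp (none : Option Char) ++ none :: D =
      List.replicate (jp + 1) (none : Option Char) ++ D := by
    rw [List.replicate_succ' (n := jp)]; simp
  simp [h3, List.replicate_succ]

theorem arr_step' (S D : List (Option Char)) (v : Char) (t k : Nat)
    (hS : S.length = t) (hlt : t < k) :
    ((S ++ (List.replicate (k - t) (none : Option Char) ++ (some v :: D))).set t (some v)).set
        k none =
      (S ++ [some v]) ++ (List.replicate (k - t) (none : Option Char) ++ D) := by
  subst hS
  obtain ⟨j, rfl⟩ : ∃ j, k = S.length + j := ⟨k - S.length, by omega⟩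
  have hj : 1 ≤ j := by omega
  have h1 : S.length + j - S.length = j := by omega
  rw [h1]
  exact arr_step S D j hj v

theorem pull_inv (rev : List (Option Char)) (k : Nat) (hk : k ≤ rev.length) :
    (List.range k).foldl pullStep (rev, ([] : List Nat)) =
      ((rev.take k).filter (fun c => c.isSome) ++
        List.replicate (k - ((rev.take k).filter (fun c => c.isSome)).length) none ++
        rev.drop k,
       List.range' ((rev.take k).filter (fun c => c.isSome)).length
         (k - ((rev.take k).filter (fun c => c.isSome)).length)) := by
  induction k with
  | zero => simp
  | succ k ih =>
    have hk' : k ≤ rev.length := by omega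
    have hklt : k < rev.length := by omega
    have ht_le : ((rev.take k).filter (fun c => c.isSome)).length ≤ k := by
      calc ((rev.take k).filter (fun c => c.isSome)).length
          ≤ (rev.take k).length := List.length_filter_le _ _
        _ = k := by rw [List.length_take]; omega
    set t := ((rev.take k).filter (fun c => c.isSome)).length with ht
    clear_value t
    have hdrop : rev.drop k = rev[k] :: rev.drop (k+1) := List.drop_eq_getElem_cons hklt
    have htake : rev.take (k+1) = rev.take k ++ [rev[k]] := by
      rw [List.take_add_one]
      congr 1
      rw [List.getElem?_eq_getElem hklt]
      rfl
    rw [List.range_succ, List.foldl_append, ih hk']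
    -- the element examined at step k is rev[k]
    have hget : ((rev.take k).filter (fun c => c.isSome) ++
        (List.replicate (k - t) (none : Option Char) ++ rev.drop k)).getD k none = rev[k] := by
      rw [List.getD_append_right _ _ _ _ (by simp [← ht]; try omega)]
      rw [List.getD_append_right _ _ _ _ (by simp [← ht]; try omega)]
      simp [← ht]
      rw [List.getElem?_eq_getElem hklt]
      rfl
    cases hcell : rev[k] with
    | none =>
      rw [hcell] at hget hdrop htake
      -- empty slot: the array is unchanged and k joins the queue
      simp only [List.foldl_cons, List.foldl_nil, pullStep, List.append_assoc, hget]
      rw [htake]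
      have hfil : ((rev.take k ++ [(none : Option Char)]).filter (fun c => c.isSome)) =
          (rev.take k).filter (fun c => c.isSome) := by
        rw [List.filter_append]; simp
      rw [hfil, ← ht, Prod.mk.injEq]
      have h1 : (k+1) - t = (k - t) + 1 := by omega
      refine ⟨?_, ?_⟩
      · rw [hdrop, h1, List.replicate_succ' (n := k - t)]
        simp
      · have h2 : t + (k - t) = k := by omega
        rw [h1, List.range'_1_concat, h2]
    | some v =>
      rw [hcell] at hget hdrop htake
      simp only [List.foldl_cons, List.foldl_nil, pullStep, List.append_assoc, hget]
      rw [htake]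
      have hfil : ((rev.take k ++ [some v]).filter (fun c => c.isSome)) =
          (rev.take k).filter (fun c => c.isSome) ++ [some v] := by
        rw [List.filter_append]; simp
      have ht1 : ((rev.take k).filter (fun c => c.isSome) ++ [some v]).length = t + 1 := by
        simp [← ht]
      rw [hfil, ht1]
      by_cases hq : k - t = 0
      · -- no empty slot below: nothing moves
        simp only [hq, List.range'_zero, List.replicate_zero, List.nil_append]
        have h0 : (k+1) - (t+1) = 0 := by omega
        rw [h0]
        simp only [List.range'_zero, List.replicate_zero, List.nil_append]
        rw [hdrop]
        simp
      · -- the block drops onto the lowest empty slot, its own slot becomes empty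
        have hrange : List.range' t (k - t) = t :: List.range' (t+1) (k - t - 1) := by
          have hpos : k - t = (k - t - 1) + 1 := by omega
          rw [hpos, List.range'_succ]
          simp
        rw [hrange]
        rw [Prod.mk.injEq]
        refine ⟨?_, ?_⟩
        · rw [hdrop]
          have h2 : (k+1) - (t+1) = k - t := by omega
          rw [h2]
          exact arr_step' _ _ v t k ht.symm (by omega)
        · have h2 : (k+1) - (t+1) = (k - t - 1) + 1 := by omega
          have h3 : (t + 1) + (k - t - 1) = k := by omega
          rw [h2, List.range'_1_concat, h3]

-- A's deque gravity = pad of nones over the surviving blocks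
theorem pullCol_eq (col : List (Option Char)) :
    pullCol col = List.replicate (col.length - (col.filter (fun c => c.isSome)).length) none ++
      col.filter (fun c => c.isSome) := by
  unfold pullCol
  rw [pull_inv col.reverse col.reverse.length (le_refl _)]
  simp only [List.take_length, List.drop_length, List.append_nil]
  rw [List.filter_reverse]
  simp [List.reverse_append]

-- the key per-column equality: A's remove-then-pull column = B's compacted column
theorem column_eq (mat : List (List (Option Char))) (vis : List (List Nat))
    {m' n' : Nat} (hm : WFc m' n' mat) (hv : WFv m' n' vis) (j : Nat) (hj : j < n') :
    pullCol (colOfC (removeA mat vis).1 j) = compactCol m' (colOfC mat j) (colOfN vis j) := by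
  rw [removeA_fst mat vis hm hv, colOfC_zipWith mat vis hm hv j hj, pullCol_eq]
  have hlenC : (colOfC mat j).length = m' := by simp [colOfC, hm.1]
  have hlenN : (colOfN vis j).length = m' := by simp [colOfN, hv.1]
  rw [filter_zipWith_eq_survivors]
  have hlenz : (List.zipWith remCell (colOfC mat j) (colOfN vis j)).length = m' := by
    rw [List.length_zipWith, hlenC, hlenN]; omega
  rw [compactCol]
  rw [← filter_zipWith_eq_survivors, hlenz]

theorem assembleM_wf (m' n' : Nat) (cols : List (List (Option Char))) :
    WFc m' n' (assembleM m' n' cols) := by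
  constructor
  · simp [assembleM]
  · intro r hr
    simp [assembleM] at hr
    obtain ⟨i, _, hi⟩ := hr
    simp [← hi]

theorem loop_eq (f : Nat) (m' n' : Nat) (ans : Int) (mat : List (List (Option Char)))
    (hm : WFc m' n' mat) : loopA f m' n' ans mat = loopB f m' n' ans mat := by
  induction f generalizing ans mat with
  | zero => rfl
  | succ f ih =>
    rw [loopA, loopB]
    by_cases hflag : (markSquares m' n' mat).2 = false
    · simp [hflag]
    · simp only [hflag]
      have hv := markSquares_wf m' n' mat
      rw [removeA_count mat _ hm hv]
      have hcols : (List.range n').map (fun j => pullCol (colOfC (removeA mat (markSquares m' n' mat).1).1 j)) =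
          (List.range n').map (fun j => compactCol m' (colOfC mat j) (colOfN (markSquares m' n' mat).1 j)) := by
        apply List.map_congr_left
        intro j hj
        exact column_eq mat _ hm hv j (List.mem_range.mp hj)
      rw [hcols]
      exact ih _ _ (assembleM_wf m' n' _)

theorem buildRowAux_len (s : List Char) :
    ∀ (c j : Nat) (r : List (Option Char)), buildRowAux s c j = some r → r.length = c := by
  intro c
  induction c with
  | zero => intro j r h; simp [buildRowAux] at h; simp [← h]
  | succ c ih =>
    intro j r h
    rw [buildRowAux] at h
    cases hj : s[j]? with
    | none => simp only [hj] at h; simp at h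
    | some ch =>
      simp only [hj] at h
      cases hr : buildRowAux s c (j+1) with
      | none => simp only [hr] at h; simp at h
      | some r' =>
        simp only [hr, Option.some.injEq] at h
        rw [← h]
        simp [ih _ _ hr]

theorem buildAux_wf (n' : Nat) (board : List String) :
    ∀ (c i : Nat) (mat : List (List (Option Char))), buildAux n' board c i = some mat →
      mat.length = c ∧ ∀ r ∈ mat, r.length = n' := by
  intro c
  induction c with
  | zero =>
    intro i mat h
    simp [buildAux] at h
    subst h
    simp
  | succ c ih =>
    intro i mat h
    rw [buildAux] at h
    cases hi : board[i]? with
    | none => simp only [hi] at h; simp at h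
    | some s =>
      simp only [hi] at h
      cases hr : buildRowAux s.toList n' 0 with
      | none => simp only [hr] at h; simp at h
      | some r =>
        simp only [hr] at h
        cases hm : buildAux n' board c (i+1) with
        | none => simp only [hm] at h; simp at h
        | some rs =>
          simp only [hm, Option.some.injEq] at h
          obtain ⟨hlen, hrows⟩ := ih _ _ hm
          rw [← h]
          refine ⟨by simp [hlen], ?_⟩
          intro x hx
          rcases List.mem_cons.mp hx with h' | h'
          · rw [h']; exact buildRowAux_len s.toList n' 0 r hr
          · exact hrows x h'

theorem buildMat_wf (m' n' : Nat) (board : List String) (mat : List (List (Option Char)))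
    (h : buildMat m' n' board = some mat) : WFc m' n' mat :=
  buildAux_wf n' board m' 0 mat h

-- ===== VERDICT (by name: the statement is the Claim_ definition above) =====
theorem solution_spec : Claim_equal_solution := by
  intro m n board _ _
  unfold Spec_solution solution solution_alt
  cases hb : buildMat m.toNat n.toNat board with
  | none => rfl
  | some mat => exact loop_eq _ _ _ _ _ (buildMat_wf _ _ _ _ hb)
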